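-- pv_equiv track=rewrite | github.com/DuaBilalli/Grille-TapCode-Ciphers | ciphers/tap_code.py | encrypt_tap_code
-- ===== SOURCE A (Python) =====
-- TAP_MATRIX = [
--     ['A', 'B', 'C', 'D', 'E'],
--     ['F', 'G', 'H', 'I', 'J'],
--     ['L', 'M', 'N', 'O', 'P'],
--     ['Q', 'R', 'S', 'T', 'U'],
--     ['V', 'W', 'X', 'Y', 'Z']
-- ]
--
-- def find_position(letter):
--     if letter == 'K':
--         letter = 'C'
--
--     row_number = 1
--
--     for row in TAP_MATRIX:
--         col_number = 1
--
--         for char in row: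
--             if char == letter:
--                 return row_number, col_number
--             col_number += 1
--
--         row_number += 1
--
--     return None
--
-- def encode_letter(letter):
--     position = find_position(letter)
--
--     if position is None:
--         return ""
--
--     row = position[0]
--     col = position[1]
--
--     taps_row = "." * row
--     taps_col = "." * col
--
--     return taps_row + " " + taps_col
--
-- def encrypt_tap_code(text):
--     result = []
--     text = text.strip().upper()
--
--     for char in text:
--         if char == " ":
--             result.append("/")
--         elif char.isalpha():
--             code = encode_letter(char)
--             if code != "":
--                 result.append(code)
--
--     return "   ".join(result)
-- ===== SOURCE B (Python) =====
-- def encrypt_tap_code(text):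
--     def tap(ch):
--         if not ("A" <= ch <= "Z"):
--             return None
--         c = "C" if ch == "K" else ch
--         idx = ord(c) - ord("A")
--         if c > "K":
--             idx -= 1
--         return "." * (idx // 5 + 1) + " " + "." * (idx % 5 + 1)
--
--     parts = []
--     for ch in text.strip().upper():
--         if ch == " ":
--             parts.append("/")
--         else:
--             code = tap(ch)
--             if code is not None:
--                 parts.append(code)
--     return "   ".join(parts)
-- ===== Notes on version B (the rewrite author's own statement) =====
-- stated objective: simpler
-- what changed: The per-letter position is computed by closed-form arithmetic on the character code (with the K->C merge and the skipped K accounted for by one decrement) instead of a linear search through the 5x5 TAP_MATRIX with manual row/column counters.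
import Mathlib
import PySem

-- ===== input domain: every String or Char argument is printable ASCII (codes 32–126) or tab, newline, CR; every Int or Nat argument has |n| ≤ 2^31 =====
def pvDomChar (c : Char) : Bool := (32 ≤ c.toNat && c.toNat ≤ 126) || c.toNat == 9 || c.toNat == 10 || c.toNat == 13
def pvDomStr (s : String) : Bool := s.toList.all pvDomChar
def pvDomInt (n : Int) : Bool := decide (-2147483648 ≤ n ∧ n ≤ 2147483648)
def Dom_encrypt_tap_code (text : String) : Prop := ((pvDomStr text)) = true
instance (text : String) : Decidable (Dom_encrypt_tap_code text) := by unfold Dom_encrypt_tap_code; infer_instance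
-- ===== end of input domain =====

-- B replaces A's linear search through the 5x5 matrix by closed-form arithmetic on the
-- character code; objective: simpler.

-- ===== PORT A =====
def TAP_MATRIX : List (List Char) :=
  [['A','B','C','D','E'],
   ['F','G','H','I','J'],
   ['L','M','N','O','P'],
   ['Q','R','S','T','U'],
   ['V','W','X','Y','Z']]

-- inner 'for char in row' loop of find_position
def fp_row (letter : Char) (row : List Char) (colNumber : Int) : Option Int :=
  match row with
  | [] => none
  | c :: rest => if c = letter then some colNumber else fp_row letter rest (colNumber + 1)

-- outer 'for row in TAP_MATRIX' loop of find_position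
def fp_rows (letter : Char) (rows : List (List Char)) (rowNumber : Int) : Option (Int × Int) :=
  match rows with
  | [] => none
  | r :: rest =>
    match fp_row letter r 1 with
    | some col => some (rowNumber, col)
    | none => fp_rows letter rest (rowNumber + 1)

def find_position (letter : Char) : Option (Int × Int) :=
  let letter := if letter = 'K' then 'C' else letter
  fp_rows letter TAP_MATRIX 1

def encode_letter (letter : Char) : List Char :=
  match find_position letter with
  | none => []
  | some (row, col) =>
    List.replicate row.toNat '.' ++ [' '] ++ List.replicate col.toNat '.'

def encrypt_tap_code (text : String) : String :=
  let t := PySem.Chars.upper (PySem.Chars.strip text.toList)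
  let result := t.foldl (fun acc c =>
    if c = ' ' then acc ++ [['/']]
    else if PySem.Chars.isalpha c then
      let code := encode_letter c
      if code ≠ [] then acc ++ [code] else acc
    else acc) []
  String.ofList (PySem.Chars.join "   ".toList result)

-- ===== PORT B =====
-- helper tap(ch) of Source B: closed-form row/column arithmetic
def tapCodeChar (ch : Char) : Option (List Char) :=
  if 'A' ≤ ch ∧ ch ≤ 'Z' then
    let c := if ch = 'K' then 'C' else ch
    let idx0 := c.toNat - 'A'.toNat
    let idx := if 'K' < c then idx0 - 1 else idx0
    some (List.replicate (idx / 5 + 1) '.' ++ [' '] ++ List.replicate (idx % 5 + 1) '.')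
  else none

def encrypt_tap_code_alt (text : String) : String :=
  let parts := (PySem.Chars.upper (PySem.Chars.strip text.toList)).foldl (fun acc ch =>
    if ch = ' ' then acc ++ [['/']]
    else match tapCodeChar ch with
      | some code => acc ++ [code]
      | none => acc) []
  String.ofList (PySem.Chars.join "   ".toList parts)

-- ===== PRECONDITION & SPEC =====
def Spec_encrypt_tap_code (text : String) (out : String) : Prop := out = encrypt_tap_code_alt text
instance (text : String) (out : String) : Decidable (Spec_encrypt_tap_code text out) := by unfold Spec_encrypt_tap_code; infer_instance

-- ===== CLAIM (what is proved, stated in full; the proofs are below) =====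
def Claim_equal_encrypt_tap_code : Prop := ∀ (text : String), Dom_encrypt_tap_code text → Spec_encrypt_tap_code text (encrypt_tap_code text)

-- ===== LEMMAS AND PROOFS =====

lemma fp_row_none (c : Char) (row : List Char) (n : Int) (h : c ∉ row) :
    fp_row c row n = none := by
  induction row generalizing n with
  | nil => rfl
  | cons x xs ih =>
    simp only [List.mem_cons, not_or] at h
    simp only [fp_row, if_neg (Ne.symm h.1)]
    exact ih (n + 1) h.2

lemma fp_rows_none (c : Char) (rows : List (List Char)) (n : Int)
    (h : ∀ r ∈ rows, c ∉ r) : fp_rows c rows n = none := by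
  induction rows generalizing n with
  | nil => rfl
  | cons r rs ih =>
    simp only [fp_rows, fp_row_none c r 1 (h r (by simp))]
    exact ih (n + 1) (fun r' hr' => h r' (by simp [hr']))

lemma encode_letter_of_not_upper (c : Char) (h : ¬ ('A' ≤ c ∧ c ≤ 'Z')) :
    encode_letter c = [] := by
  have hv : ¬ (65 ≤ c.toNat ∧ c.toNat ≤ 90) := by
    intro hcon
    exact h ⟨by simpa [Char.le_def, UInt32.le_iff_toNat_le] using hcon.1,
             by simpa [Char.le_def, UInt32.le_iff_toNat_le] using hcon.2⟩
  have hK : c ≠ 'K' := by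
    intro hc; subst hc; exact hv (by decide)
  have hmem : ∀ r ∈ TAP_MATRIX, c ∉ r := by
    intro r hr hc
    have : 65 ≤ c.toNat ∧ c.toNat ≤ 90 := by
      simp only [TAP_MATRIX, List.mem_cons, List.not_mem_nil, or_false] at hr
      rcases hr with h1 | h1 | h1 | h1 | h1 <;> subst h1 <;>
        simp only [List.mem_cons, List.not_mem_nil, or_false] at hc <;>
        rcases hc with h2 | h2 | h2 | h2 | h2 <;> subst h2 <;> decide
    exact hv this
  simp [encode_letter, find_position, hK, fp_rows_none c TAP_MATRIX 1 hmem]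

lemma tap_upper (c : Char) (h1 : 'A' ≤ c) (h2 : c ≤ 'Z') :
    tapCodeChar c = some (encode_letter c) ∧ encode_letter c ≠ [] := by
  have ha : 65 ≤ c.toNat := by simpa [Char.le_def, UInt32.le_iff_toNat_le] using h1
  have hb : c.toNat ≤ 90 := by simpa [Char.le_def, UInt32.le_iff_toNat_le] using h2
  have hc : c = Char.ofNat c.toNat := by simp [Char.ofNat_toNat]
  generalize hg : c.toNat = n at ha hb hc
  interval_cases n <;> (rw [hc]; decide)

lemma step_eq (acc : List (List Char)) (c : Char) :
    (if c = ' ' then acc ++ [['/']]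
     else if PySem.Chars.isalpha c then
       let code := encode_letter c
       if code ≠ [] then acc ++ [code] else acc
     else acc)
    = (if c = ' ' then acc ++ [['/']]
       else match tapCodeChar c with
         | some code => acc ++ [code]
         | none => acc) := by
  by_cases hsp : c = ' '
  · simp [hsp]
  by_cases hU : 'A' ≤ c ∧ c ≤ 'Z'
  · -- an uppercase ASCII letter: both sides append the same code (tap_upper)
    obtain ⟨htap, hne⟩ := tap_upper c hU.1 hU.2
    have halpha : PySem.Chars.isalpha c = true := by
      simp [PySem.Chars.isalpha, PySem.Chars.isupper, hU.1, hU.2]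
    simp [hsp, halpha, hne, htap]
  · -- not an uppercase letter: A appends nothing (isalpha false, or lowercase
    -- letter absent from the matrix), B's tap returns none
    have hB : tapCodeChar c = none := by simp [tapCodeChar, hU]
    by_cases hA : PySem.Chars.isalpha c = true
    · simp [hsp, hA, hB, encode_letter_of_not_upper c hU]
    · simp [hsp, hA, hB]

-- ===== VERDICT (by name: the statement is the Claim_ definition above) =====
theorem encrypt_tap_code_spec : Claim_equal_encrypt_tap_code := by
  intro text _
  unfold Spec_encrypt_tap_code encrypt_tap_code encrypt_tap_code_alt
  have hf : (fun (acc : List (List Char)) (c : Char) =>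
      if c = ' ' then acc ++ [['/']]
      else if PySem.Chars.isalpha c then
        let code := encode_letter c
        if code ≠ [] then acc ++ [code] else acc
      else acc)
    = (fun (acc : List (List Char)) (ch : Char) =>
      if ch = ' ' then acc ++ [['/']]
      else match tapCodeChar ch with
        | some code => acc ++ [code]
        | none => acc) := by
    funext acc c; exact step_eq acc c
  rw [hf]
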